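-- pv_equiv track=rewrite | github.com/IkhlasQass19/READABILITY-OF-ARABIC-TEXTS | AppWeb/app.py | lemmes_ambigus
-- ===== SOURCE A (Python) =====
-- def lemmes_ambigus(lems, pos):
--     lemme_amb = []
--     for lem in lems: #set(lems):  # Parcours des lemmes uniques
--         indices = [i for i, x in enumerate(lems) if x == lem]  # Récupération des indices du lem dans lems
--         pos_tmp = pos[indices[0]]  # Premier tag POS associé au lem
--
--         for index in indices[1:]:  # Parcours des indices restants pour le même lem
--             pos_actuel = pos[index]  # Tag POS actuel associé au lem
--             if pos_actuel != pos_tmp:  # Comparaison des tags POS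
--                 lemme_amb.append(lem)  # Si les tags POS sont différents, ajout à la liste des lemmes ambigus
--                 break  # Sortie de la boucle pour passer au lem suivant
--
--     return lemme_amb
-- ===== SOURCE B (Python) =====
-- def lemmes_ambigus(lems, pos):
--     # Two-phase: one indexed pass groups the POS tags of each lemma,
--     # then one filtering pass keeps the lemmas with more than one distinct tag.
--     tags = {}
--     for i in range(len(lems)):
--         tags.setdefault(lems[i], []).append(pos[i])
--     return [lem for lem in lems if len(set(tags[lem])) > 1]
-- ===== Notes on version B (the rewrite author's own statement) =====
-- stated objective: faster
-- what changed: A rescans the whole lemma list (enumerate + index filter) for every element; B builds a lemma-to-tags index in one indexed pass and then emits, in order, the lemmas whose tag set has more than one element.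
-- outside the precondition, e.g. on lemmes_ambigus(['a', 'a', 'a'], ['x', 'y']): A returns ['a', 'a', 'a'], B raises IndexError
import Mathlib
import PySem

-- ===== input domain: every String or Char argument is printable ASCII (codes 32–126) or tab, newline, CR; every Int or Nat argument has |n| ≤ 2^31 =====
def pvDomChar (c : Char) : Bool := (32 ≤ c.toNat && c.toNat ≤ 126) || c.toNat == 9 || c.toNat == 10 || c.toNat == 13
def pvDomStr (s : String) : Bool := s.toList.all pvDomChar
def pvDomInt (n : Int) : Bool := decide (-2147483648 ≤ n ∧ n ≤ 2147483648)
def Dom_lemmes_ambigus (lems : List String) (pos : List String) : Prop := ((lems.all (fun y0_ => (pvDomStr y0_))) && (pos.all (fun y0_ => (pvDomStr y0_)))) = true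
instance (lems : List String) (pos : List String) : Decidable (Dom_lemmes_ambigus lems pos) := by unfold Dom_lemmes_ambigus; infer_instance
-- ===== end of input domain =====

-- B replaces A's per-element rescan of the whole lemma list by one grouping pass plus one filter (faster).


-- ===== PORT A =====
def lemmes_ambigus (lems : List String) (pos : List String) : List String :=
  lems.foldl (fun acc lem =>
    let indices : List Int :=
      (PySem.List.enumerate lems).filterMap (fun p => if p.2 == lem then some p.1 else none)
    let posTmp := PySem.List.pyGetD pos (indices.headD 0) ""
    if (indices.drop 1).any (fun j => PySem.List.pyGetD pos j "" != posTmp)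
    then acc ++ [lem] else acc) []

-- ===== PORT B =====
def lemmes_ambigus_alt (lems : List String) (pos : List String) : List String :=
  let tags : PySem.Dict String (List String) :=
    (PySem.List.pyRange 0 (lems.length : Int) 1).foldl
      (fun d i => d.modify (PySem.List.pyGetD lems i "") []
        (fun l => l ++ [PySem.List.pyGetD pos i ""]))
      PySem.Dict.empty
  lems.filter (fun lem => 1 < (PySem.Set.ofList (tags.getD lem [])).length)

-- ===== PRECONDITION & SPEC =====
-- Pre_ excludes inputs where pos is shorter than lems: A raises IndexError there except when an
-- early break happens to hide the short list (then A returns by accident); B raises on all of them.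
def Pre_lemmes_ambigus (lems : List String) (pos : List String) : Prop :=
  lems.length ≤ pos.length
instance (lems : List String) (pos : List String) : Decidable (Pre_lemmes_ambigus lems pos) := by
  unfold Pre_lemmes_ambigus; infer_instance

def pvWitness_lemmes_ambigus : List String × List String :=
  (["go", "be", "go", "be"], ["V", "V", "N", "V"])

def Spec_lemmes_ambigus (lems : List String) (pos : List String) (out : List String) : Prop :=
  out = lemmes_ambigus_alt lems pos
instance (lems : List String) (pos : List String) (out : List String) : Decidable (Spec_lemmes_ambigus lems pos out) := by
  unfold Spec_lemmes_ambigus; infer_instance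

-- ===== CLAIM (what is proved, stated in full; the proofs are below) =====
def Claim_equal_lemmes_ambigus : Prop := ∀ (lems : List String) (pos : List String), Dom_lemmes_ambigus lems pos → Pre_lemmes_ambigus lems pos → Spec_lemmes_ambigus lems pos (lemmes_ambigus lems pos)

-- ===== LEMMAS AND PROOFS =====

-- The occurrence list of the POS tags of one lemma, in order.
def pvOcc (lems pos : List String) (lem : String) : List String :=
  ((lems.zip pos).filter (fun q => q.1 == lem)).map (·.2)

-- B's index loop over range(len(lems)) is a fold over the zipped pairs (pos at least as long).
lemma fold_range_eq_fold_zip {β : Type} (f : β → String → String → β)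
    (lems pos : List String) (hlen : lems.length ≤ pos.length) :
    ∀ (n s : Nat) (init : β), s + n = lems.length →
      (PySem.List.pyRange (s : Int) (lems.length : Int) 1).foldl
          (fun b i => f b (PySem.List.pyGetD lems i "") (PySem.List.pyGetD pos i "")) init
        = ((lems.drop s).zip (pos.drop s)).foldl (fun b p => f b p.1 p.2) init := by
  intro n
  induction n with
  | zero =>
    intro s init hs
    have h1 : (lems.length : Int) ≤ (s : Int) := by omega
    rw [PySem.List.pyRange_one_eq_nil h1]
    have : lems.length ≤ s := by omega
    rw [List.drop_eq_nil_of_le this]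
    simp
  | succ n ih =>
    intro s init hs
    have hsl : s < lems.length := by omega
    have hsp : s < pos.length := by omega
    have h1 : (s : Int) < (lems.length : Int) := by exact_mod_cast hsl
    rw [PySem.List.pyRange_one_cons h1, List.foldl_cons]
    rw [List.drop_eq_getElem_cons hsl, List.drop_eq_getElem_cons hsp]
    rw [List.zip_cons_cons, List.foldl_cons]
    have hcast : ((s : Int) + 1) = ((s + 1 : Nat) : Int) := by push_cast; ring
    rw [hcast]
    rw [ih (s + 1) _ (by omega)]
    congr 1
    simp [PySem.List.pyGetD_natCast, List.getD_eq_getElem?_getD, List.getElem?_eq_getElem hsl,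
      List.getElem?_eq_getElem hsp]

-- A's indices-of-lem, read back through pos, are exactly the occurrence tags of lem.
lemma indices_map_pos (lem : String) (ps : List String) :
    ∀ (ls : List String) (s : Nat), s + ls.length ≤ ps.length →
      ((PySem.List.enumerate ls (s : Int)).filterMap
          (fun p => if p.2 == lem then some p.1 else none)).map
          (fun j => PySem.List.pyGetD ps j "")
        = ((ls.zip (ps.drop s)).filter (fun q => q.1 == lem)).map (·.2) := by
  intro ls
  induction ls with
  | nil => intro s h; simp [PySem.List.enumerate]
  | cons x t ih =>
    intro s h
    have hsp : s < ps.length := by simp at h; omega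
    rw [PySem.List.enumerate_cons]
    rw [List.drop_eq_getElem_cons hsp, List.zip_cons_cons]
    have hcast : ((s : Int) + 1) = ((s + 1 : Nat) : Int) := by push_cast; ring
    have ihs := ih (s + 1) (by simp at h ⊢; omega)
    by_cases hx : (x == lem) = true
    · simp only [List.filterMap_cons, List.filter_cons, hx, if_pos, List.map_cons]
      rw [hcast, ihs]
      congr 1
      simp [PySem.List.pyGetD_natCast, List.getD_eq_getElem?_getD, List.getElem?_eq_getElem hsp]
    · simp only [List.filterMap_cons, List.filter_cons, hx, if_neg, Bool.false_eq_true,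
        not_false_iff]
      rw [hcast, ihs]

lemma length_le_foldl_add {α : Type} [BEq α] :
    ∀ (l acc : List α), acc.length ≤ (l.foldl PySem.Set.add acc).length := by
  intro l
  induction l with
  | nil => intro acc; simp
  | cons x t ih =>
    intro acc
    refine le_trans ?_ (ih (PySem.Set.add acc x))
    simp [PySem.Set.add]
    split <;> simp

lemma foldl_add_singleton_iff (t : String) :
    ∀ (rest : List String),
      (1 < (rest.foldl PySem.Set.add [t]).length) ↔ ∃ y ∈ rest, y ≠ t := by
  intro rest
  induction rest with
  | nil => simp
  | cons y ys ih =>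
    by_cases hy : y = t
    · subst hy
      have : PySem.Set.add [y] y = [y] := by simp [PySem.Set.add, PySem.Set.contains]
      simp only [List.foldl_cons, this]
      rw [ih]
      constructor
      · rintro ⟨z, hz, hzt⟩; exact ⟨z, by simp [hz], hzt⟩
      · rintro ⟨z, hz, hzt⟩
        simp at hz
        rcases hz with h | h
        · exact absurd h hzt
        · exact ⟨z, h, hzt⟩
    · have hadd : PySem.Set.add [t] y = [t, y] := by
        simp [PySem.Set.add, PySem.Set.contains]
        intro h; exact absurd h hy
      simp only [List.foldl_cons, hadd]
      constructor
      · intro _; exact ⟨y, by simp, hy⟩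
      · intro _
        have := length_le_foldl_add ys [t, y]
        simp at this
        omega

-- set(t :: rest) has more than one element iff some later tag differs from the first one.
lemma one_lt_ofList_cons_iff (t : String) (rest : List String) :
    (1 < (PySem.Set.ofList (t :: rest)).length) ↔ ∃ y ∈ rest, y ≠ t := by
  rw [PySem.Set.ofList_eq_foldl]
  have hinit : List.foldl PySem.Set.add [] (t :: rest) = List.foldl PySem.Set.add [t] rest := by
    simp [PySem.Set.add, PySem.Set.contains]
  rw [hinit]
  exact foldl_add_singleton_iff t rest

-- In B, tags[lem] is exactly the occurrence tag list of lem.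
lemma tags_getD_eq_occ (lems pos : List String) (hlen : lems.length ≤ pos.length) (lem : String) :
    ((PySem.List.pyRange 0 (lems.length : Int) 1).foldl
        (fun d i => d.modify (PySem.List.pyGetD lems i "") []
          (fun l => l ++ [PySem.List.pyGetD pos i ""]))
        PySem.Dict.empty).getD lem []
      = pvOcc lems pos lem := by
  have h0 : ((0 : Nat) : Int) = (0 : Int) := rfl
  rw [← h0]
  rw [fold_range_eq_fold_zip
    (fun (d : PySem.Dict String (List String)) a b => d.modify a [] (fun l => l ++ [b]))
    lems pos hlen lems.length 0 PySem.Dict.empty (by omega)]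
  simp only [List.drop_zero]
  rw [PySem.Dict.getD_foldl_modify_append]
  simp [pvOcc, PySem.Dict.getD_empty]

-- ===== VERDICT (by name: the statement is the Claim_ definition above) =====
theorem lemmes_ambigus_spec : Claim_equal_lemmes_ambigus := by
  intro lems pos _hdom hpre
  have hlen : lems.length ≤ pos.length := hpre
  unfold Spec_lemmes_ambigus lemmes_ambigus lemmes_ambigus_alt
  rw [PySem.List.foldl_append_if
    (fun lem =>
      (((PySem.List.enumerate lems).filterMap
          (fun p => if p.2 == lem then some p.1 else none)).drop 1).any
        (fun j => PySem.List.pyGetD pos j "" !=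
          PySem.List.pyGetD pos
            (((PySem.List.enumerate lems).filterMap
              (fun p => if p.2 == lem then some p.1 else none)).headD 0) ""))
    (fun lem => lem) lems []]
  rw [List.nil_append]
  rw [show (List.map (fun lem => lem) = fun (l : List String) => l) from funext List.map_id']
  apply List.filter_congr
  intro lem hmem
  rw [tags_getD_eq_occ lems pos hlen lem]
  -- both sides reduce to: some later occurrence tag differs from the first one
  have hocc := indices_map_pos lem pos lems 0 (by omega)
  simp only [Nat.cast_zero, List.drop_zero] at hocc
  set idx := (PySem.List.enumerate lems).filterMap
      (fun p => if p.2 == lem then some p.1 else none) with hidx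
  have hmem' : ∃ j js, idx = j :: js := by
    rcases List.mem_iff_getElem.mp hmem with ⟨k, hk, hkeq⟩
    have hkm : ((0 : Int) + k, lems[k]) ∈ PySem.List.enumerate lems 0 :=
      (PySem.List.mem_enumerate_iff _ _ _).mpr ⟨k, hk, rfl⟩
    have : (k : Int) ∈ idx := by
      rw [hidx]
      apply List.mem_filterMap.mpr
      refine ⟨((0 : Int) + k, lems[k]), hkm, ?_⟩
      simp [hkeq]
    cases hx : idx with
    | nil => rw [hx] at this; simp at this
    | cons j js => exact ⟨j, js, rfl⟩
  obtain ⟨j, js, hx⟩ := hmem'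
  rw [hx] at hocc ⊢
  unfold pvOcc
  rw [← hocc]
  simp only [List.map_cons]
  simp only [List.headD_cons, List.drop_succ_cons, List.drop_zero]
  have hiff := one_lt_ofList_cons_iff (PySem.List.pyGetD pos j "") (js.map (fun j => PySem.List.pyGetD pos j ""))
  rw [Bool.eq_iff_iff]
  simp only [List.any_eq_true, List.mem_map, bne_iff_ne, ne_eq, decide_eq_true_eq, hiff]
  constructor
  · rintro ⟨i, hi, hne⟩; exact ⟨_, ⟨i, hi, rfl⟩, hne⟩
  · rintro ⟨y, ⟨i, hi, rfl⟩, hne⟩; exact ⟨i, hi, hne⟩
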